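-- pv_equiv track=rewrite | github.com/aquefir/djacarta | djacarta.py | bufpos2vispos
-- ===== SOURCE A (Python) =====
-- def bufpos2vispos(text, tabsz, offs):
-- 	i = 0
-- 	ret = 0
-- 	textlen = len(text)
-- 	if offs > textlen:
-- 		return textlen
-- 	while i < offs:
-- 		if text[i] == '\t':
-- 			ret += tabsz
-- 		else:
-- 			ret += 1
-- 		i += 1
-- 	return ret
-- ===== SOURCE B (Python) =====
-- def bufpos2vispos(text, tabsz, offs):
--     textlen = len(text)
--     if offs > textlen:
--         return textlen
--     n = max(offs, 0)
--     return n + (tabsz - 1) * text[:n].count('\t')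
-- ===== Notes on version B (the rewrite author's own statement) =====
-- stated objective: simpler
-- what changed: Replaces the per-character while loop with its tab/non-tab branch by clamping the offset, counting tabs in the prefix with str.count, and the closed-form expression n + (tabsz-1)*tabs.
import Mathlib
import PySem

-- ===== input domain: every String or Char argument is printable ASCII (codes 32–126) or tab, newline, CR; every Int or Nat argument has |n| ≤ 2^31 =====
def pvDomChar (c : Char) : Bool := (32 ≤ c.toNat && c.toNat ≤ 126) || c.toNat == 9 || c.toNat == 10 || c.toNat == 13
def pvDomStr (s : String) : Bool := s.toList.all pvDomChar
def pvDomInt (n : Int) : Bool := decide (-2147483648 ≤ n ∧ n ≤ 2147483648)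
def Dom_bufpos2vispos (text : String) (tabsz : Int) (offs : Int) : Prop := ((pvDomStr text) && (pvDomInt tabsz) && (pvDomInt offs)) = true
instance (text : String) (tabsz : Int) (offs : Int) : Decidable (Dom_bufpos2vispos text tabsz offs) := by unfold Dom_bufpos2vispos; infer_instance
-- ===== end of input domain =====

-- B replaces A's per-character loop by clamping the offset, counting tabs in the prefix, and a
-- closed-form expression n + (tabsz-1)*tabs (objective: simpler).

-- ===== PORT A =====
-- the while loop: runs while i < offs, i starting at 0, so exactly offs.toNat iterations (fuel);
-- text[i] is in range whenever Python reaches it (guard offs ≤ len and i < offs), so the getD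
-- default is never used and the port is exact.
def bufpos2visposLoop (cs : List Char) (tabsz : Int) : Nat → Int → Int → Int
  | 0, _i, ret => ret
  | fuel+1, i, ret =>
      bufpos2visposLoop cs tabsz fuel (i + 1)
        (if (PySem.List.pyGet? cs i).getD ' ' = '\t' then ret + tabsz else ret + 1)

def bufpos2vispos (text : String) (tabsz : Int) (offs : Int) : Int :=
  let cs := text.toList
  let textlen : Int := cs.length
  if offs > textlen then textlen
  else bufpos2visposLoop cs tabsz offs.toNat 0 0

-- ===== PORT B =====
def bufpos2vispos_alt (text : String) (tabsz : Int) (offs : Int) : Int :=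
  let cs := text.toList
  let textlen : Int := cs.length
  if offs > textlen then textlen
  else
    let n := max offs 0
    n + (tabsz - 1) * (PySem.Chars.count (PySem.Chars.slice cs none (some n)) ['\t'] : Int)

-- ===== PRECONDITION & SPEC =====
def Spec_bufpos2vispos (text : String) (tabsz : Int) (offs : Int) (out : Int) : Prop := out = bufpos2vispos_alt text tabsz offs
instance (text : String) (tabsz : Int) (offs : Int) (out : Int) : Decidable (Spec_bufpos2vispos text tabsz offs out) := by unfold Spec_bufpos2vispos; infer_instance

-- ===== CLAIM (what is proved, stated in full; the proofs are below) =====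
def Claim_equal_bufpos2vispos : Prop := ∀ (text : String) (tabsz : Int) (offs : Int), Dom_bufpos2vispos text tabsz offs → Spec_bufpos2vispos text tabsz offs (bufpos2vispos text tabsz offs)

-- ===== LEMMAS AND PROOFS =====

-- str.count with a single-character needle is List.count
lemma countGo_single (c : Char) : ∀ (l : List Char) (fuel acc : Nat), l.length ≤ fuel →
    PySem.Chars.count.go [c] fuel l acc = acc + l.count c := by
  intro l
  induction l with
  | nil => intro fuel acc _; cases fuel <;> simp [PySem.Chars.count.go]
  | cons h t ih =>
    intro fuel acc hf
    cases fuel with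
    | zero => simp at hf
    | succ f =>
      have ht : t.length ≤ f := by simp at hf; omega
      have hpre : List.isPrefixOf [c] (h :: t) = (c == h) := by simp [List.isPrefixOf]
      by_cases hc : c = h
      · subst hc
        simp only [PySem.Chars.count.go, hpre, BEq.rfl, if_pos, List.length_cons,
          List.length_nil, List.drop_succ_cons, List.drop_zero]
        rw [ih f (acc + 1) ht, List.count_cons_self]
        omega
      · have hb : (c == h) = false := by simp [hc]
        simp only [PySem.Chars.count.go, hpre, hb, if_neg Bool.false_ne_true]
        rw [ih f acc ht, List.count_cons_of_ne (by exact fun e => hc e.symm)]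

lemma chars_count_single (c : Char) (l : List Char) : PySem.Chars.count l [c] = l.count c := by
  simp only [PySem.Chars.count, List.isEmpty_cons, if_neg Bool.false_ne_true]
  simpa using countGo_single c l l.length 0 le_rfl

-- the loop computes (iterations) + (tabsz-1) * (tabs visited)
lemma loop_closed_form (cs : List Char) (tabsz : Int) :
    ∀ (fuel : Nat) (j : Nat) (ret : Int),
      bufpos2visposLoop cs tabsz fuel (j : Int) ret
        = ret + fuel + (tabsz - 1) * (((cs.drop j).take fuel).count '\t' : Int) := by
  intro fuel
  induction fuel with
  | zero => intro j ret; simp [bufpos2visposLoop]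
  | succ f ih =>
    intro j ret
    have hstep : ((j : Int) + 1) = ((j + 1 : Nat) : Int) := by push_cast; ring
    by_cases hj : j < cs.length
    · have hget : PySem.List.pyGet? cs (j : Int) = some cs[j] := by
        simp [PySem.List.pyGet?_natCast, List.getElem?_eq_getElem hj]
      have hdrop : cs.drop j = cs[j] :: cs.drop (j + 1) := List.drop_eq_getElem_cons hj
      by_cases hc : cs[j] = '\t'
      · simp only [bufpos2visposLoop, hget, Option.getD_some, if_pos hc, hstep, ih]
        rw [hdrop, List.take_succ_cons, List.count_cons, if_pos (by simp [hc])]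
        push_cast; ring
      · simp only [bufpos2visposLoop, hget, Option.getD_some, if_neg hc, hstep, ih]
        rw [hdrop, List.take_succ_cons, List.count_cons, if_neg (by simp [hc])]
        push_cast; ring
    · have hget : PySem.List.pyGet? cs (j : Int) = none := by
        simp only [PySem.List.pyGet?_natCast]
        exact List.getElem?_eq_none (by omega)
      simp only [bufpos2visposLoop, hget, Option.getD_none]
      rw [if_neg (by decide : ¬ (' ' = '\t')), hstep, ih]
      rw [List.drop_eq_nil_of_le (by omega : cs.length ≤ j),
        List.drop_eq_nil_of_le (by omega : cs.length ≤ j + 1)]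
      simp
      omega

-- ===== VERDICT (by name: the statement is the Claim_ definition above) =====
theorem bufpos2vispos_spec : Claim_equal_bufpos2vispos := by
  intro text tabsz offs _
  unfold Spec_bufpos2vispos bufpos2vispos bufpos2vispos_alt
  set cs := text.toList with hcs
  by_cases hgt : offs > (cs.length : Int)
  · simp [hgt]
  · simp only [if_neg hgt]
    have hmax : ((offs.toNat : Nat) : Int) = max offs 0 := Int.ofNat_toNat offs
    have hcf := loop_closed_form cs tabsz offs.toNat 0 0
    norm_num at hcf
    rw [hcf, PySem.Chars.slice_eq_listSlice, PySem.List.slice_to cs (le_max_right offs 0),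
      chars_count_single]
    have hnn : (max offs 0).toNat = offs.toNat := by omega
    rw [hnn, ← hmax]
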